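-- pv_equiv track=rewrite | github.com/WillCona/INF_SUPERIOR_I_ELT327 | AUXILIATURA/PRACTICA1/3ejercicio10.py | combinar_diccionarios
-- ===== SOURCE A (Python) =====
-- def combinar_diccionarios(dic1, dic2):
--     combinado = {}
--
--     for clave in dic1:
--         combinado[clave] = dic1[clave]
--
--     for clave in dic2:
--         combinado[clave] = dic2[clave]
--
--     claves = list(combinado.keys())
--
--     n = len(claves)
--     for i in range(n):
--         for j in range(0, n - i - 1):
--             if str(claves[j]) > str(claves[j + 1]):
--                 claves[j], claves[j + 1] = claves[j + 1], claves[j]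
--
--     diccionario_ordenado = {}
--     for clave in claves:
--         diccionario_ordenado[clave] = combinado[clave]
--
--     return diccionario_ordenado
-- ===== SOURCE B (Python) =====
-- def combinar_diccionarios(dic1, dic2):
--     combinado = {**dic1, **dic2}
--     return {clave: combinado[clave] for clave in sorted(combinado, key=str)}
-- ===== Notes on version B (the rewrite author's own statement) =====
-- stated objective: faster
-- what changed: replaces the hand-written O(n^2) bubble sort of the merged keys with Python's built-in sorted(..., key=str), and builds the merged dict with {**dic1, **dic2} and a dict comprehension instead of explicit loops
import Mathlib
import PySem

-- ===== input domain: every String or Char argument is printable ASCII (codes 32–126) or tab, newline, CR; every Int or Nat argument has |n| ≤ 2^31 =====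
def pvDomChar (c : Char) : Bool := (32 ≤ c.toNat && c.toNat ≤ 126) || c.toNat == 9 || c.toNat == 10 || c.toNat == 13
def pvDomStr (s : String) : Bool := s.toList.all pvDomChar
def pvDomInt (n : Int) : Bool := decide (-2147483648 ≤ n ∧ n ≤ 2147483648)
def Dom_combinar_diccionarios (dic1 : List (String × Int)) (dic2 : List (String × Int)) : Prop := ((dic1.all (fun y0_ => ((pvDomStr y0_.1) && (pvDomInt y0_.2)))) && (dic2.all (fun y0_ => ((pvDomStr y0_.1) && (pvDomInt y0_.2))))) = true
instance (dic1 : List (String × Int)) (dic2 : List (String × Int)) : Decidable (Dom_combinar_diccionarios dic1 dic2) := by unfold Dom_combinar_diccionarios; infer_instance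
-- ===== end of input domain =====

-- B replaces A's hand-written O(n^2) bubble sort of the merged keys with the built-in sort
-- (objective: faster). Both ports canonicalise each dict parameter with PySem.Dict.ofList,
-- exactly as Python receives the arguments as dicts.

-- ===== PORT A =====
-- Port of A. `dic1[clave]` with clave a key of dic1 never raises, so it is ported as getD with
-- an unreachable default 0. `str(claves[j])` on a string key is the key itself, so the
-- comparison is ported as String `>` (Python's code-point order, per PySem).
def combinar_diccionarios (dic1 : List (String × Int)) (dic2 : List (String × Int)) : List (String × Int) :=
  let d1 := PySem.Dict.ofList dic1
  let d2 := PySem.Dict.ofList dic2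
  -- combinado = {}; for clave in dic1: combinado[clave] = dic1[clave]
  let combinado := d1.keys.foldl (fun d k => d.insert k (d1.getD k 0)) PySem.Dict.empty
  -- for clave in dic2: combinado[clave] = dic2[clave]
  let combinado := d2.keys.foldl (fun d k => d.insert k (d2.getD k 0)) combinado
  -- claves = list(combinado.keys()); n = len(claves)
  let claves := combinado.keys
  let n : Int := claves.length
  -- the bubble sort: for i in range(n): for j in range(0, n-i-1): compare-and-swap
  let claves := (PySem.List.pyRange 0 n 1).foldl (fun cl i =>
    (PySem.List.pyRange 0 (n - i - 1) 1).foldl (fun cl j =>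
      if PySem.List.pyGetD cl j "" > PySem.List.pyGetD cl (j + 1) "" then
        PySem.List.pySetD (PySem.List.pySetD cl j (PySem.List.pyGetD cl (j + 1) "")) (j + 1)
          (PySem.List.pyGetD cl j "")
      else cl) cl) claves
  -- diccionario_ordenado = {}; for clave in claves: diccionario_ordenado[clave] = combinado[clave]
  (claves.foldl (fun d k => d.insert k (combinado.getD k 0)) PySem.Dict.empty).items

-- ===== PORT B =====
-- Port of B. `{**dic1, **dic2}` is dic1's dict updated with dic2's items; `sorted(combinado, key=str)`
-- sorts the keys (str on a str key is the identity, ported as the identity key).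
def combinar_diccionarios_alt (dic1 : List (String × Int)) (dic2 : List (String × Int)) : List (String × Int) :=
  let combinado := (PySem.Dict.ofList dic1).update (PySem.Dict.ofList dic2).items
  let claves := PySem.List.sorted combinado.keys (fun k => k) false
  (claves.foldl (fun d k => d.insert k (combinado.getD k 0)) PySem.Dict.empty).items

-- ===== PRECONDITION & SPEC =====
def Spec_combinar_diccionarios (dic1 : List (String × Int)) (dic2 : List (String × Int)) (out : List (String × Int)) : Prop := out = combinar_diccionarios_alt dic1 dic2
instance (dic1 : List (String × Int)) (dic2 : List (String × Int)) (out : List (String × Int)) : Decidable (Spec_combinar_diccionarios dic1 dic2 out) := by unfold Spec_combinar_diccionarios; infer_instance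

-- ===== CLAIM (what is proved, stated in full; the proofs are below) =====
def Claim_equal_combinar_diccionarios : Prop := ∀ (dic1 : List (String × Int)) (dic2 : List (String × Int)), Dom_combinar_diccionarios dic1 dic2 → Spec_combinar_diccionarios dic1 dic2 (combinar_diccionarios dic1 dic2)

-- ===== LEMMAS AND PROOFS =====

-- one compare-and-swap step of A's inner loop, on Nat indices
def bstep (cl : List String) (j : Nat) : List String :=
  if cl.getD j "" > cl.getD (j + 1) "" then (cl.set j (cl.getD (j + 1) "")).set (j + 1) (cl.getD j "")
  else cl

-- one full bubble pass over a list, as structural recursion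
def bpass : List String → List String
  | [] => []
  | [x] => [x]
  | x :: y :: r => if y < x then y :: bpass (x :: r) else x :: bpass (y :: r)

theorem bpass_length (l : List String) : (bpass l).length = l.length := by
  fun_induction bpass l <;> simp_all

theorem bpass_perm (l : List String) : (bpass l).Perm l := by
  fun_induction bpass l with
  | case1 => exact List.Perm.refl _
  | case2 x => exact List.Perm.refl _
  | case3 x y r h ih => exact ((ih.cons y).trans (List.Perm.swap x y r))
  | case4 x y r h ih => exact ih.cons x

theorem bpass_split (l : List String) (h : l ≠ []) :
    ∃ t b, bpass l = t ++ [b] ∧ ∀ x ∈ l, x ≤ b := by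
  fun_induction bpass l with
  | case1 => simp at h
  | case2 x => exact ⟨[], x, rfl, by simp⟩
  | case3 x y r hlt ih =>
      obtain ⟨t, b, he, hb⟩ := ih (by simp)
      refine ⟨y :: t, b, by simp [he], ?_⟩
      intro z hz
      simp only [List.mem_cons] at hz
      rcases hz with rfl | rfl | hz
      · exact hb z (by simp)
      · exact le_of_lt (lt_of_lt_of_le hlt (hb x (by simp)))
      · exact hb z (by simp [hz])
  | case4 x y r hlt ih =>
      obtain ⟨t, b, he, hb⟩ := ih (by simp)
      refine ⟨x :: t, b, by simp [he], ?_⟩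
      intro z hz
      simp only [List.mem_cons] at hz
      rcases hz with rfl | rfl | hz
      · exact le_trans (le_of_not_gt hlt) (hb y (by simp))
      · exact hb z (by simp)
      · exact hb z (by simp [hz])

theorem inner_cast (m : Int) (cl : List String) :
    (PySem.List.pyRange 0 m 1).foldl (fun cl j =>
      if PySem.List.pyGetD cl j "" > PySem.List.pyGetD cl (j + 1) "" then
        PySem.List.pySetD (PySem.List.pySetD cl j (PySem.List.pyGetD cl (j + 1) "")) (j + 1)
          (PySem.List.pyGetD cl j "")
      else cl) cl = (List.range m.toNat).foldl bstep cl := by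
  rw [PySem.List.pyRange_one, List.foldl_map, Int.sub_zero]
  apply PySem.List.foldl_congr_mem
  intro cl' k _
  have h2 : ((k : Int) + 1) = (((k + 1 : Nat)) : Int) := by push_cast; ring
  have g1 : ∀ (xs : List String), PySem.List.pyGetD xs ((k : Int) + 1) "" = xs.getD (k + 1) "" := by
    intro xs; rw [h2, PySem.List.pyGetD_natCast]
  have s1 : ∀ (xs : List String) (v : String), PySem.List.pySetD xs ((k : Int) + 1) v = xs.set (k + 1) v := by
    intro xs v; rw [h2, PySem.List.pySetD_natCast]
  simp only [zero_add, g1, s1, PySem.List.pyGetD_natCast, PySem.List.pySetD_natCast, bstep]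

theorem bstep_cons_succ (x : String) (cl : List String) (j : Nat) :
    bstep (x :: cl) (j + 1) = x :: bstep cl j := by
  simp only [bstep, List.getD_cons_succ, List.set_cons_succ]
  split <;> rfl

theorem bstep_shift (js : List Nat) (x : String) (cl : List String) :
    (js.map (· + 1)).foldl bstep (x :: cl) = x :: js.foldl bstep cl := by
  induction js generalizing cl with
  | nil => rfl
  | cons j js ih => simp only [List.map_cons, List.foldl_cons, bstep_cons_succ, ih]

theorem inner_pass (m : Nat) (cl : List String) (h : m + 1 ≤ cl.length) :
    (List.range m).foldl bstep cl = bpass (cl.take (m + 1)) ++ cl.drop (m + 1) := by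
  induction m generalizing cl with
  | zero =>
      match cl, h with
      | a :: r, _ => simp [bpass]
  | succ m ih =>
      match cl, h with
      | a :: b :: r, h =>
        rw [List.range_succ_eq_map, List.foldl_cons]
        have hstep : bstep (a :: b :: r) 0 = if a > b then b :: a :: r else a :: b :: r := by
          simp [bstep]
        rw [hstep]
        by_cases hab : a > b
        · rw [if_pos hab]
          have : (List.map Nat.succ (List.range m)).foldl bstep (b :: a :: r) = b :: (List.range m).foldl bstep (a :: r) := by
            have := bstep_shift (List.range m) b (a :: r)
            simpa [Nat.succ_eq_add_one] using this
          rw [this, ih (a :: r) (by simpa using Nat.le_of_succ_le_succ h)]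
          have hb : bpass (List.take (m + 1 + 1) (a :: b :: r)) = b :: bpass (a :: List.take m r) := by
            simp only [List.take_succ_cons]
            show bpass (a :: b :: List.take m r) = _
            simp [bpass, hab]
          rw [hb]
          simp
        · rw [if_neg hab]
          have : (List.map Nat.succ (List.range m)).foldl bstep (a :: b :: r) = a :: (List.range m).foldl bstep (b :: r) := by
            have := bstep_shift (List.range m) a (b :: r)
            simpa [Nat.succ_eq_add_one] using this
          rw [this, ih (b :: r) (by simpa using Nat.le_of_succ_le_succ h)]
          have hb : bpass (List.take (m + 1 + 1) (a :: b :: r)) = a :: bpass (b :: List.take m r) := by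
            simp only [List.take_succ_cons]
            show bpass (a :: b :: List.take m r) = _
            have : ¬ b < a := hab
            simp [bpass, this]
          rw [hb]
          simp

theorem outer_sorts (n : Nat) (cl0 : List String) (hlen : cl0.length = n) :
    ∀ k, k ≤ n → ((List.range k).foldl (fun cl i => (List.range (n - i - 1)).foldl bstep cl) cl0).Perm cl0 ∧
      ((List.range k).foldl (fun cl i => (List.range (n - i - 1)).foldl bstep cl) cl0).length = n ∧
      (((List.range k).foldl (fun cl i => (List.range (n - i - 1)).foldl bstep cl) cl0).drop (n - k)).Pairwise (· ≤ ·) ∧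
      (∀ x ∈ ((List.range k).foldl (fun cl i => (List.range (n - i - 1)).foldl bstep cl) cl0).take (n - k),
        ∀ y ∈ ((List.range k).foldl (fun cl i => (List.range (n - i - 1)).foldl bstep cl) cl0).drop (n - k), x ≤ y) := by
  intro k
  induction k with
  | zero =>
      intro _
      simp only [List.range_zero, List.foldl_nil, Nat.sub_zero]
      refine ⟨List.Perm.refl _, hlen, ?_, ?_⟩
      · rw [List.drop_eq_nil_of_le (by omega)]; exact List.Pairwise.nil
      · intro x _ y hy
        rw [List.drop_eq_nil_of_le (by omega)] at hy
        simp at hy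
  | succ k ih =>
      intro hk
      obtain ⟨hperm, hl, hsort, hcross⟩ := ih (by omega)
      set cl := (List.range k).foldl (fun cl i => (List.range (n - i - 1)).foldl bstep cl) cl0 with hcl
      rw [List.range_succ, List.foldl_append, List.foldl_cons, List.foldl_nil, ← hcl]
      have hm : n - k - 1 + 1 = n - k := by omega
      have hpass : (List.range (n - k - 1)).foldl bstep cl = bpass (cl.take (n - k)) ++ cl.drop (n - k) := by
        rw [inner_pass (n - k - 1) cl (by omega), hm]
      have htne : cl.take (n - k) ≠ [] := by
        have h1 : (cl.take (n - k)).length = n - k := by simp [hl]; try omega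
        intro hc; rw [hc] at h1; simp at h1; omega
      obtain ⟨t, b, he, hb⟩ := bpass_split _ htne
      have hperm_pass : (bpass (cl.take (n - k))).Perm (cl.take (n - k)) := bpass_perm _
      have hbl : (bpass (cl.take (n - k))).length = n - k := by
        rw [bpass_length]; simp [hl]; try omega
      have htlen : t.length = n - (k + 1) := by
        rw [he] at hbl; simp at hbl; omega
      have hmem_t : ∀ x ∈ t, x ∈ cl.take (n - k) := by
        intro x hx
        exact hperm_pass.mem_iff.mp (by rw [he]; simp [hx])
      have hbmem : b ∈ cl.take (n - k) :=
        hperm_pass.mem_iff.mp (by rw [he]; simp)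
      have hdropR : ((t ++ [b]) ++ cl.drop (n - k)).drop (n - (k + 1)) = b :: cl.drop (n - k) := by
        rw [List.append_assoc, ← htlen, List.drop_left]; rfl
      have htakeR : ((t ++ [b]) ++ cl.drop (n - k)).take (n - (k + 1)) = t := by
        rw [List.append_assoc, ← htlen, List.take_left]
      refine ⟨?_, ?_, ?_, ?_⟩
      · rw [hpass]
        exact ((hperm_pass.append_right _).trans
          (by rw [List.take_append_drop] : (cl.take (n - k) ++ cl.drop (n - k)).Perm cl)).trans hperm
      · rw [hpass]; simp [hbl, hl]; try omega
      · rw [hpass, he, hdropR]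
        refine List.Pairwise.cons ?_ hsort
        intro y hy; exact hcross b hbmem y hy
      · rw [hpass, he, hdropR, htakeR]
        intro x hx y hy
        have hxt := hmem_t x hx
        rcases List.mem_cons.mp hy with rfl | hy
        · exact hb x hxt
        · exact hcross x hxt y hy

theorem bubble_eq_sorted (claves : List String) :
    (PySem.List.pyRange 0 (claves.length : Int) 1).foldl (fun cl i =>
      (PySem.List.pyRange 0 ((claves.length : Int) - i - 1) 1).foldl (fun cl j =>
        if PySem.List.pyGetD cl j "" > PySem.List.pyGetD cl (j + 1) "" then
          PySem.List.pySetD (PySem.List.pySetD cl j (PySem.List.pyGetD cl (j + 1) "")) (j + 1)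
            (PySem.List.pyGetD cl j "")
        else cl) cl) claves = PySem.List.sorted claves (fun k => k) false := by
  set n := claves.length with hn
  have hcast : (PySem.List.pyRange 0 (n : Int) 1).foldl (fun cl i =>
      (PySem.List.pyRange 0 ((n : Int) - i - 1) 1).foldl (fun cl j =>
        if PySem.List.pyGetD cl j "" > PySem.List.pyGetD cl (j + 1) "" then
          PySem.List.pySetD (PySem.List.pySetD cl j (PySem.List.pyGetD cl (j + 1) "")) (j + 1)
            (PySem.List.pyGetD cl j "")
        else cl) cl) claves
      = (List.range n).foldl (fun cl i => (List.range (n - i - 1)).foldl bstep cl) claves := by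
    rw [PySem.List.pyRange_one, List.foldl_map, Int.sub_zero, Int.toNat_natCast]
    apply PySem.List.foldl_congr_mem
    intro cl k hk
    rw [inner_cast]
    congr 1
    have hk' : k < n := List.mem_range.mp hk
    congr 1
    omega
  rw [hcast]
  obtain ⟨hperm, -, hsort, -⟩ := outer_sorts n claves hn.symm n le_rfl
  rw [Nat.sub_self, List.drop_zero] at hsort
  exact (PySem.List.sorted_id_eq_of_perm_of_pairwise claves _ hperm hsort).symm

theorem ofList_items (d : PySem.Dict String Int) (h : d.keys.Nodup) :
    PySem.Dict.ofList d.items = d := by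
  apply PySem.Dict.ext
  show (PySem.Dict.empty.update d.items).items = d.items
  unfold PySem.Dict.update
  have := PySem.Dict.items_foldl_insert_fresh d.items Prod.fst Prod.snd PySem.Dict.empty
    (by intro a _; simp [PySem.Dict.contains_empty]) (by simpa [PySem.Dict.keys] using h)
  simpa using this

theorem loop_eq_update (d e : PySem.Dict String Int) (h : d.keys.Nodup) :
    d.keys.foldl (fun acc k => acc.insert k (d.getD k 0)) e = e.update d.items := by
  rw [PySem.Dict.items_eq_map_keys d h 0]
  unfold PySem.Dict.update
  rw [List.foldl_map]

-- ===== VERDICT (by name: the statement is the Claim_ definition above) =====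
theorem combinar_diccionarios_spec : Claim_equal_combinar_diccionarios := by
  intro dic1 dic2 _
  unfold Spec_combinar_diccionarios combinar_diccionarios combinar_diccionarios_alt
  have h1 := PySem.Dict.nodup_keys_ofList (κ := String) (ν := Int) dic1
  have h2 := PySem.Dict.nodup_keys_ofList (κ := String) (ν := Int) dic2
  simp only [loop_eq_update _ _ h1, loop_eq_update _ _ h2]
  have hmerge : (PySem.Dict.empty.update (PySem.Dict.ofList dic1).items).update (PySem.Dict.ofList dic2).items
      = (PySem.Dict.ofList dic1).update (PySem.Dict.ofList dic2).items := by
    congr 1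
    exact ofList_items (PySem.Dict.ofList dic1) h1
  rw [hmerge, bubble_eq_sorted]
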